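-- pv_equiv track=rewrite | github.com/breadwithmeth/atomic_obligations | main.py | header_role_indices
-- ===== SOURCE A (Python) =====
-- from typing import Any, Dict, List, Optional, Tuple
--
-- def header_role_indices(header: List[str], roles_syn: Dict[str, List[str]]) -> Dict[str, int]:
--     low = [c.lower() for c in header]
--     idx: Dict[str, int] = {}
--     for role, syns in (roles_syn or {}).items():
--         for i, cell in enumerate(low):
--             if any(s in cell for s in syns):
--                 idx[role] = i
--                 break
--     return idx
-- ===== SOURCE B (Python) =====
-- from typing import Dict, List
--
-- def header_role_indices(header: List[str], roles_syn: Dict[str, List[str]]) -> Dict[str, int]: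
--     # Inverted nesting: one left-to-right scan of the header cells; each still-pending
--     # role is assigned the first cell index whose lowercased text contains a synonym,
--     # and drops out of the pending list once assigned.
--     pending = list((roles_syn or {}).items())
--     found: Dict[str, int] = {}
--     for i, cell in enumerate(header):
--         if not pending:
--             break
--         cell = cell.lower()
--         remaining = []
--         for role, syns in pending:
--             if any(s in cell for s in syns):
--                 found[role] = i
--             else:
--                 remaining.append((role, syns))
--         pending = remaining
--     return {role: found[role] for role in (roles_syn or {}) if role in found}
-- ===== Notes on version B (the rewrite author's own statement) =====
-- stated objective: alternative
-- what changed: Inverted the loop nesting: B makes one left-to-right pass over the lowercased header cells, maintaining a pending list of still-unassigned roles (a role gets the current index on its first synonym match and drops out; the scan stops when none are pending), then rebuilds the mapping in role order; A instead rescans the header from the start for every role. Pre_ excludes association lists with duplicate role keys, which cannot arise from the Python dict parameter and where A's overwrite order is accidental.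
import Mathlib
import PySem

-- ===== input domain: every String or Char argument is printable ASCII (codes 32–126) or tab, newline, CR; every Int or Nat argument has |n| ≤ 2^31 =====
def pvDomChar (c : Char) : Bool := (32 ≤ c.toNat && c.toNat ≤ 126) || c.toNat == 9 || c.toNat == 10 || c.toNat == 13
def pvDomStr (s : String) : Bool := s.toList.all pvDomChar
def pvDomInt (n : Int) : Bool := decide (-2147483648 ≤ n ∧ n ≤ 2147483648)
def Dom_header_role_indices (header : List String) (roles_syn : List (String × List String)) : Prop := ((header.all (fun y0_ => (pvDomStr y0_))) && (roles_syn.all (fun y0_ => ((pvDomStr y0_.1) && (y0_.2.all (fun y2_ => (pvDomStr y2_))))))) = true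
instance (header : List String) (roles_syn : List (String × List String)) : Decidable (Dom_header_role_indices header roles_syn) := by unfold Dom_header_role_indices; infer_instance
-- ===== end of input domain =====

-- B inverts the loop nesting: one scan of the header cells assigns each still-pending role its
-- first matching cell index (assigned roles drop out of the pending list, and the scan stops when
-- none are pending); the mapping is then rebuilt in role order. Same return value.

-- ===== PORT A =====
-- any(s in cell for s in syns)  (used verbatim by both Pythons)
def pyAnyIn (syns : List String) (cell : String) : Bool :=
  syns.any (fun s => PySem.Str.isIn s cell)

-- A's inner loop: 'for i, cell in enumerate(low): if any(...): idx[role]=i; break'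
def aScan (role : String) (syns : List String) (i : Nat) (low : List String)
    (idx : PySem.Dict String Int) : PySem.Dict String Int :=
  match low with
  | [] => idx
  | c :: rest =>
      if pyAnyIn syns c then idx.insert role (Int.ofNat i)
      else aScan role syns (i + 1) rest idx

def header_role_indices (header : List String) (roles_syn : List (String × List String)) : List (String × Int) :=
  let low := header.map PySem.Str.lower
  let idx := (if roles_syn.isEmpty then [] else roles_syn).foldl
      (fun idx p => aScan p.1 p.2 0 low idx) PySem.Dict.empty
  idx.items

-- ===== PORT B =====
-- B's inner loop over the pending roles: matched roles go into found, the rest into remaining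
def bCell (cell : String) (i : Int) (pending : List (String × List String))
    (found : PySem.Dict String Int) : List (String × List String) × PySem.Dict String Int :=
  pending.foldl
    (fun st q =>
      if pyAnyIn q.2 cell then (st.1, st.2.insert q.1 i)
      else (st.1 ++ [q], st.2))
    ([], found)

-- B's outer loop: 'for i, cell in enumerate(header): if not pending: break; ...'
def bScan (cells : List (Int × String)) (pending : List (String × List String))
    (found : PySem.Dict String Int) : PySem.Dict String Int :=
  match cells with
  | [] => found
  | p :: rest =>
      if pending.isEmpty then found
      else
        let st := bCell (PySem.Str.lower p.2) p.1 pending found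
        bScan rest st.1 st.2

def header_role_indices_alt (header : List String) (roles_syn : List (String × List String)) : List (String × Int) :=
  let pending := if roles_syn.isEmpty then [] else roles_syn
  let found := bScan (PySem.List.enumerate header 0) pending PySem.Dict.empty
  ((if roles_syn.isEmpty then [] else roles_syn).foldl
      (fun out q =>
        match found.get? q.1 with
        | some v => out.insert q.1 v
        | none => out)
      PySem.Dict.empty).items

-- ===== PRECONDITION & SPEC =====
-- Pre_ excludes association lists with duplicate role keys: such an input cannot arise from a
-- Python dict (the parameter's type), and on them A's last-overwrite value order is accidental.
def Pre_header_role_indices (header : List String) (roles_syn : List (String × List String)) : Prop :=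
  (roles_syn.map Prod.fst).Nodup
instance (header : List String) (roles_syn : List (String × List String)) : Decidable (Pre_header_role_indices header roles_syn) := by unfold Pre_header_role_indices; infer_instance

def pvWitness_header_role_indices : List String × (List (String × List String)) :=
  (["Name ", "Qty"], [("name", ["name"]), ("qty", ["qty", "count"])])

def Spec_header_role_indices (header : List String) (roles_syn : List (String × List String)) (out : List (String × Int)) : Prop := out = header_role_indices_alt header roles_syn
instance (header : List String) (roles_syn : List (String × List String)) (out : List (String × Int)) : Decidable (Spec_header_role_indices header roles_syn out) := by unfold Spec_header_role_indices; infer_instance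

-- ===== CLAIM (what is proved, stated in full; the proofs are below) =====
def Claim_equal_header_role_indices : Prop := ∀ (header : List String) (roles_syn : List (String × List String)), Dom_header_role_indices header roles_syn → Pre_header_role_indices header roles_syn → Spec_header_role_indices header roles_syn (header_role_indices header roles_syn)

-- ===== LEMMAS AND PROOFS =====

-- first index of a matching cell (proof-side characterisation shared by both directions)
def sFind (syns : List String) (low : List String) : Option Nat :=
  low.findIdx? (fun c => pyAnyIn syns c)

theorem aScan_eq (role : String) (syns : List String) (low : List String) :
    ∀ (n : Nat) (idx : PySem.Dict String Int),
      aScan role syns n low idx =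
        match sFind syns low with
        | some j => idx.insert role (Int.ofNat (n + j))
        | none => idx := by
  induction low with
  | nil => intro n idx; simp [aScan, sFind]
  | cons c rest ih =>
      intro n idx
      by_cases h : pyAnyIn syns c
      · simp [aScan, sFind, List.findIdx?_cons, h]
      · simp only [aScan, sFind, List.findIdx?_cons, h, Bool.false_eq_true, if_false]
        rw [ih]
        simp only [sFind]
        cases hfind : List.findIdx? (fun c => pyAnyIn syns c) rest with
        | none => simp
        | some j => simp [Option.map_some]; ring_nf

theorem freshFold (g : (String × List String) → Option Int) :
    ∀ (roles : List (String × List String)) (d : PySem.Dict String Int),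
      (roles.map Prod.fst).Nodup →
      (∀ q ∈ roles, d.contains q.1 = false) →
      (roles.foldl
          (fun out q =>
            match g q with
            | some v => out.insert q.1 v
            | none => out) d).items
        = d.items ++ roles.filterMap (fun q => (g q).map (fun v => (q.1, v))) := by
  intro roles
  induction roles with
  | nil => intro d _ _; simp
  | cons q rest ih =>
      intro d hnd hfresh
      simp only [List.map_cons, List.nodup_cons] at hnd
      cases hg : g q with
      | none =>
          simp only [List.foldl_cons, hg]
          rw [ih d hnd.2 (fun r hr => hfresh r (List.mem_cons_of_mem _ hr))]
          simp [hg]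
      | some v =>
          simp only [List.foldl_cons, hg]
          have hq : d.contains q.1 = false := hfresh q (List.mem_cons_self)
          rw [ih (d.insert q.1 v) hnd.2 ?fresh]
          · rw [PySem.Dict.items_insert_of_not_contains d v hq]
            simp [hg]
          case fresh =>
            intro r hr
            rw [PySem.Dict.contains_insert]
            have : r.1 ≠ q.1 := by
              intro he
              exact hnd.1 (he ▸ List.mem_map_of_mem hr)
            simp [this, hfresh r (List.mem_cons_of_mem _ hr)]

-- bCell leaves keys outside pending's key list untouched
theorem bCell_pres (cell : String) (i : Int) (k : String) :
    ∀ (pending : List (String × List String)) (acc : List (String × List String))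
      (f : PySem.Dict String Int),
      k ∉ pending.map Prod.fst →
      (pending.foldl
          (fun st q =>
            if pyAnyIn q.2 cell then (st.1, st.2.insert q.1 i)
            else (st.1 ++ [q], st.2))
          (acc, f)).2.get? k = f.get? k := by
  intro pending
  induction pending with
  | nil => intro acc f _; rfl
  | cons q rest ih =>
      intro acc f hk
      simp only [List.map_cons, List.mem_cons, not_or] at hk
      simp only [List.foldl_cons]
      by_cases h : pyAnyIn q.2 cell
      · rw [if_pos h, ih _ _ hk.2, PySem.Dict.get?_insert_of_ne _ _ hk.1]
      · rw [if_neg h, ih _ _ hk.2]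

-- bCell's effect on a pending role (pending keys nodup)
theorem bCell_get (cell : String) (i : Int) :
    ∀ (pending : List (String × List String)) (acc : List (String × List String))
      (f : PySem.Dict String Int) (q : String × List String),
      (pending.map Prod.fst).Nodup → q ∈ pending →
      (pending.foldl
          (fun st q' =>
            if pyAnyIn q'.2 cell then (st.1, st.2.insert q'.1 i)
            else (st.1 ++ [q'], st.2))
          (acc, f)).2.get? q.1 =
        (if pyAnyIn q.2 cell then some i else f.get? q.1) := by
  intro pending
  induction pending with
  | nil => intro acc f q _ hq; cases hq
  | cons r rest ih =>
      intro acc f q hnd hq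
      simp only [List.map_cons, List.nodup_cons] at hnd
      rcases List.mem_cons.mp hq with rfl | hq'
      · simp only [List.foldl_cons]
        by_cases h : pyAnyIn q.2 cell
        · rw [if_pos h, bCell_pres _ _ _ _ _ _ hnd.1, PySem.Dict.get?_insert_self, if_pos h]
        · rw [if_neg h, bCell_pres _ _ _ _ _ _ hnd.1, if_neg h]
      · have hne : q.1 ≠ r.1 := by
          intro he
          exact hnd.1 (he ▸ List.mem_map_of_mem hq')
        simp only [List.foldl_cons]
        by_cases h : pyAnyIn r.2 cell
        · rw [if_pos h, ih _ _ q hnd.2 hq']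
          by_cases h2 : pyAnyIn q.2 cell
          · rw [if_pos h2, if_pos h2]
          · rw [if_neg h2, if_neg h2, PySem.Dict.get?_insert_of_ne _ _ hne]
        · rw [if_neg h, ih _ _ q hnd.2 hq']

-- bCell's remaining list is the non-matching pending roles, in order
theorem bCell_fst (cell : String) (i : Int) :
    ∀ (pending : List (String × List String)) (acc : List (String × List String))
      (f : PySem.Dict String Int),
      (pending.foldl
          (fun st q =>
            if pyAnyIn q.2 cell then (st.1, st.2.insert q.1 i)
            else (st.1 ++ [q], st.2))
          (acc, f)).1 = acc ++ pending.filter (fun q => !pyAnyIn q.2 cell) := by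
  intro pending
  induction pending with
  | nil => intro acc f; simp
  | cons q rest ih =>
      intro acc f
      simp only [List.foldl_cons]
      by_cases h : pyAnyIn q.2 cell
      · rw [if_pos h, ih]
        simp [h]
      · rw [if_neg h, ih]
        simp [h]

-- the scan computes first-match indices for every role, given the pending-list invariant
theorem bScan_get (roles : List (String × List String)) (hnd : (roles.map Prod.fst).Nodup) :
    ∀ (hdr : List String) (n : Int) (pending : List (String × List String))
      (f : PySem.Dict String Int),
      pending.Sublist roles →
      (∀ q ∈ roles, (f.get? q.1 = none ↔ q ∈ pending)) →
      ∀ q ∈ roles,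
      (bScan (PySem.List.enumerate hdr n) pending f).get? q.1 =
        match f.get? q.1 with
        | some v => some v
        | none => Option.map (fun (j : Nat) => n + (j : Int)) (sFind q.2 (hdr.map PySem.Str.lower)) := by
  intro hdr
  induction hdr with
  | nil =>
      intro n pending f _ _ q _
      simp only [PySem.List.enumerate_nil, bScan]
      cases f.get? q.1 <;> rfl
  | cons c rest ih =>
      intro n pending f hsub hinv q hq
      have hndp : (pending.map Prod.fst).Nodup := (hsub.map Prod.fst).nodup hnd
      rw [PySem.List.enumerate_cons]
      by_cases hemp : pending.isEmpty
      · -- no role is pending: every role is already assigned and stays so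
        rw [show bScan ((n, c) :: PySem.List.enumerate rest (n + 1)) pending f = f from by
          simp [bScan, hemp]]
        have : q ∉ pending := by
          rcases List.isEmpty_iff.mp hemp with rfl; simp
        cases hv : f.get? q.1 with
        | some v => rfl
        | none => exact absurd ((hinv q hq).mp hv) this
      · rw [show bScan ((n, c) :: PySem.List.enumerate rest (n + 1)) pending f
            = bScan (PySem.List.enumerate rest (n + 1))
                (bCell (PySem.Str.lower c) n pending f).1
                (bCell (PySem.Str.lower c) n pending f).2 from by
          simp [bScan, hemp]]
        have hfst : (bCell (PySem.Str.lower c) n pending f).1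
            = pending.filter (fun q => !pyAnyIn q.2 (PySem.Str.lower c)) := by
          rw [bCell, bCell_fst]; rfl
        -- get? after one cell, for any role of roles
        have hget : ∀ r ∈ roles, (bCell (PySem.Str.lower c) n pending f).2.get? r.1
            = (if f.get? r.1 = none ∧ pyAnyIn r.2 (PySem.Str.lower c) then some n
               else f.get? r.1) := by
          intro r hr
          by_cases hp : r ∈ pending
          · rw [bCell, bCell_get _ _ _ _ _ _ hndp hp]
            have hrn : f.get? r.1 = none := (hinv r hr).mpr hp
            by_cases hm : pyAnyIn r.2 (PySem.Str.lower c)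
            · rw [if_pos hm, if_pos ⟨hrn, hm⟩]
            · rw [if_neg hm, if_neg (fun h => hm h.2)]
          · have hk : r.1 ∉ pending.map Prod.fst := by
              intro hk
              rcases List.mem_map.mp hk with ⟨r', hr', he⟩
              have : r' = r := List.inj_on_of_nodup_map hnd (hsub.mem hr') hr he
              exact hp (this ▸ hr')
            rw [bCell, bCell_pres _ _ _ _ _ _ hk]
            have : f.get? r.1 ≠ none := fun h => hp ((hinv r hr).mp h)
            cases hv : f.get? r.1 with
            | none => exact absurd hv this
            | some v => rw [if_neg (fun h => Option.some_ne_none v h.1)]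
        -- invariant is preserved
        have hsub' : ((bCell (PySem.Str.lower c) n pending f).1).Sublist roles := by
          rw [hfst]; exact List.Sublist.trans List.filter_sublist hsub
        have hinv' : ∀ r ∈ roles,
            ((bCell (PySem.Str.lower c) n pending f).2.get? r.1 = none
              ↔ r ∈ (bCell (PySem.Str.lower c) n pending f).1) := by
          intro r hr
          rw [hget r hr, hfst, List.mem_filter]
          by_cases hm : pyAnyIn r.2 (PySem.Str.lower c)
          · by_cases hrn : f.get? r.1 = none
            · rw [if_pos ⟨hrn, hm⟩]
              simp [hm]
            · rw [if_neg (fun h => hrn h.1)]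
              simp [hrn, hm]
          · rw [if_neg (fun h => hm h.2)]
            constructor
            · intro hrn; exact ⟨(hinv r hr).mp hrn, by simp [hm]⟩
            · intro h; exact (hinv r hr).mpr h.1
        rw [ih (n + 1) _ _ hsub' hinv' q hq, hget q hq]
        by_cases hm : pyAnyIn q.2 (PySem.Str.lower c)
        · cases hv : f.get? q.1 with
          | some v => rw [if_neg (fun h => Option.some_ne_none v h.1)]
          | none =>
              rw [if_pos ⟨rfl, hm⟩]
              simp [sFind, List.findIdx?_cons, hm]
        · rw [if_neg (fun h => hm h.2)]
          cases hv : f.get? q.1 with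
          | some v => simp
          | none =>
              simp only [List.map_cons, sFind, List.findIdx?_cons]
              rw [if_neg (by simpa using hm)]
              cases hfind : List.findIdx? (fun x => pyAnyIn q.2 x) (rest.map PySem.Str.lower) with
              | none => rfl
              | some j => simp; ring_nf

-- ===== VERDICT (by name: the statement is the Claim_ definition above) =====
theorem header_role_indices_spec : Claim_equal_header_role_indices := by
  intro header roles_syn _ hpre
  unfold Spec_header_role_indices header_role_indices header_role_indices_alt
  cases roles_syn with
  | nil => rfl
  | cons r0 rs =>
      have hnd : (((r0 :: rs) : List (String × List String)).map Prod.fst).Nodup := hpre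
      simp only [List.isEmpty_cons, Bool.false_eq_true, if_false]
      -- A's side: rewrite each per-role scan by its characterisation, then the fresh-key fold
      have hA :
          ((r0 :: rs).foldl (fun idx p => aScan p.1 p.2 0 (header.map PySem.Str.lower) idx)
              PySem.Dict.empty).items
            = (PySem.Dict.empty (κ := String) (ν := Int)).items ++
              (r0 :: rs).filterMap
                (fun q => (sFind q.2 (header.map PySem.Str.lower)).map
                  (fun j => (q.1, Int.ofNat j))) := by
        have hcongr :
            (fun (idx : PySem.Dict String Int) (p : String × List String) =>
                aScan p.1 p.2 0 (header.map PySem.Str.lower) idx)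
              = fun idx p =>
                match (sFind p.2 (header.map PySem.Str.lower)).map Int.ofNat with
                | some v => idx.insert p.1 v
                | none => idx := by
          funext idx p
          rw [aScan_eq]
          cases sFind p.2 (header.map PySem.Str.lower) <;> simp
        rw [hcongr, freshFold _ (r0 :: rs) PySem.Dict.empty hnd (fun q _ => rfl)]
        congr 1
        apply List.filterMap_congr
        intro q _
        cases sFind q.2 (header.map PySem.Str.lower) <;> simp
      -- B's side: the scan dict holds exactly the first-match index of every role
      have hB :
          ∀ q ∈ (r0 :: rs),
            (bScan (PySem.List.enumerate header 0) (r0 :: rs) PySem.Dict.empty).get? q.1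
              = (sFind q.2 (header.map PySem.Str.lower)).map (fun j => Int.ofNat j) := by
        intro q hq
        rw [bScan_get (r0 :: rs) hnd header 0 (r0 :: rs) PySem.Dict.empty
          (List.Sublist.refl _) (fun r hr => by simp [PySem.Dict.get?_empty, hr]) q hq]
        rw [PySem.Dict.get?_empty]
        cases sFind q.2 (header.map PySem.Str.lower) <;> simp
      rw [hA]
      rw [freshFold _ (r0 :: rs) PySem.Dict.empty hnd (fun q _ => rfl)]
      congr 1
      apply List.filterMap_congr
      intro q hq
      rw [hB q hq]
      cases sFind q.2 (header.map PySem.Str.lower) <;> simp
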